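-- pv_equiv track=rewrite | github.com/shiju2806/DataGenie | backend/enhanced_analytics_part4b.py | _suggest_implementation_timeline
-- ===== SOURCE A (Python) =====
-- from typing import Dict, Any, List, Optional, Union, Tuple
--
-- def _suggest_implementation_timeline(recommendations: List[str]) -> Dict[str, List[str]]:
--     """Suggest implementation timeline for recommendations"""
--
--     timeline = {'immediate': [], 'short_term': [], 'medium_term': [], 'long_term': []}
--
--     for rec in recommendations:
--         rec_lower = rec.lower()
--
--         if any(term in rec_lower for term in ['urgent', 'critical', 'immediate', 'now']):
--             timeline['immediate'].append(rec)
--         elif any(term in rec_lower for term in ['quick', 'soon', 'week', 'month']):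
--             timeline['short_term'].append(rec)
--         elif any(term in rec_lower for term in ['quarter', 'season', 'plan', 'develop']):
--             timeline['medium_term'].append(rec)
--         else:
--             timeline['long_term'].append(rec)
--
--     return timeline
-- ===== SOURCE B (Python) =====
-- # B: table-driven grouping — a classify helper finds each rec's bucket by first
-- # match in an ordered (bucket, terms) table, and the dict is built per bucket by
-- # comprehension instead of appending inside an if/elif chain over a shared dict.
-- _TABLE = [
--     ('immediate', ['urgent', 'critical', 'immediate', 'now']),
--     ('short_term', ['quick', 'soon', 'week', 'month']),
--     ('medium_term', ['quarter', 'season', 'plan', 'develop']),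
--     ('long_term', []),
-- ]
--
-- def _classify(rec):
--     rec_lower = rec.lower()
--     for name, terms in _TABLE:
--         if any(term in rec_lower for term in terms):
--             return name
--     return 'long_term'
--
-- def _suggest_implementation_timeline(recommendations):
--     return {name: [r for r in recommendations if _classify(r) == name]
--             for name, _ in _TABLE}
-- ===== Notes on version B (the rewrite author's own statement) =====
-- stated objective: alternative
-- what changed: Replaces A's single pass with an if/elif chain appending into a shared dict by a first-match classifier over an ordered (bucket, terms) table plus one filtering comprehension per bucket.
import Mathlib
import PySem

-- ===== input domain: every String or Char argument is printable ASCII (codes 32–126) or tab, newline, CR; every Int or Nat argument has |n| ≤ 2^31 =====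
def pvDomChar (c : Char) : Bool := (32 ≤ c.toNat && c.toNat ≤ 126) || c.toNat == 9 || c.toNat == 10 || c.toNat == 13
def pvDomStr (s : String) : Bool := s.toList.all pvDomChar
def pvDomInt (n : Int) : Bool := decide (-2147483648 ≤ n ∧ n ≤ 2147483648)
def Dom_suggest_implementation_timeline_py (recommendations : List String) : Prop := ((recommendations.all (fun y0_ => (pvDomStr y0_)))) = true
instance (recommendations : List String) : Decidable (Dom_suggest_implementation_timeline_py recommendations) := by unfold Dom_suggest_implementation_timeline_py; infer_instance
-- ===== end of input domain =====

-- B groups by a first-match table classifier (one bucket comprehension per key) instead of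
-- A's single pass appending through an if/elif chain into a shared dict; objective: alternative decomposition.

-- ===== PORT A =====
-- 'any(term in rec_lower for term in terms)' — the guard expression both Pythons use
def pvHit (terms : List String) (rec_lower : String) : Bool :=
  terms.any (fun term => PySem.Str.isIn term rec_lower)

-- one loop step of A's 'for rec in recommendations' body
def pvStepA (d : PySem.Dict String (List String)) (rec : String) : PySem.Dict String (List String) :=
  let rec_lower := PySem.Str.lower rec
  if pvHit ["urgent", "critical", "immediate", "now"] rec_lower then
    d.modify "immediate" [] (fun l => l ++ [rec])
  else if pvHit ["quick", "soon", "week", "month"] rec_lower then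
    d.modify "short_term" [] (fun l => l ++ [rec])
  else if pvHit ["quarter", "season", "plan", "develop"] rec_lower then
    d.modify "medium_term" [] (fun l => l ++ [rec])
  else
    d.modify "long_term" [] (fun l => l ++ [rec])

def suggest_implementation_timeline_py (recommendations : List String) : List (String × List String) :=
  (recommendations.foldl pvStepA
    (PySem.Dict.ofList [("immediate", []), ("short_term", []), ("medium_term", []), ("long_term", [])])).items

-- ===== PORT B =====
def pvTable : List (String × List String) :=
  [("immediate", ["urgent", "critical", "immediate", "now"]),
   ("short_term", ["quick", "soon", "week", "month"]),
   ("medium_term", ["quarter", "season", "plan", "develop"]),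
   ("long_term", [])]

-- B's _classify: first table row one of whose terms occurs in rec.lower(), else 'long_term'
def pvClassifyGo (rows : List (String × List String)) (rec_lower : String) : String :=
  match rows with
  | [] => "long_term"
  | (name, terms) :: rest =>
    if pvHit terms rec_lower then name
    else pvClassifyGo rest rec_lower

def pvClassify (rec : String) : String := pvClassifyGo pvTable (PySem.Str.lower rec)

def suggest_implementation_timeline_py_alt (recommendations : List String) : List (String × List String) :=
  pvTable.map (fun p => (p.1, recommendations.filter (fun r => pvClassify r == p.1)))

-- ===== PRECONDITION & SPEC =====
def Spec_suggest_implementation_timeline_py (recommendations : List String) (out : List (String × List String)) : Prop := out = suggest_implementation_timeline_py_alt recommendations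
instance (recommendations : List String) (out : List (String × List String)) : Decidable (Spec_suggest_implementation_timeline_py recommendations out) := by unfold Spec_suggest_implementation_timeline_py; infer_instance

-- ===== CLAIM (what is proved, stated in full; the proofs are below) =====
def Claim_equal_suggest_implementation_timeline_py : Prop := ∀ (recommendations : List String), Dom_suggest_implementation_timeline_py recommendations → Spec_suggest_implementation_timeline_py recommendations (suggest_implementation_timeline_py recommendations)

-- ===== LEMMAS AND PROOFS =====

-- the loop invariant: folding A's step from a dict holding the four buckets l1..l4
-- appends to each bucket exactly the recs B classifies into it, in order
lemma pvFold_items (recs : List String) (l1 l2 l3 l4 : List String) :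
    (recs.foldl pvStepA
      (PySem.Dict.mk [("immediate", l1), ("short_term", l2), ("medium_term", l3), ("long_term", l4)])).items
    = [("immediate", l1 ++ recs.filter (fun r => pvClassify r == "immediate")),
       ("short_term", l2 ++ recs.filter (fun r => pvClassify r == "short_term")),
       ("medium_term", l3 ++ recs.filter (fun r => pvClassify r == "medium_term")),
       ("long_term", l4 ++ recs.filter (fun r => pvClassify r == "long_term"))] := by
  induction recs generalizing l1 l2 l3 l4 with
  | nil => simp
  | cons r rest ih =>
    by_cases h1 : pvHit ["urgent", "critical", "immediate", "now"] (PySem.Str.lower r) = true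
    · simp [pvStepA, h1, PySem.Dict.modify, PySem.Dict.insert, PySem.Dict.getD,
        PySem.Dict.get?, PySem.Dict.contains, ih, pvClassify, pvClassifyGo, pvTable]
    · by_cases h2 : pvHit ["quick", "soon", "week", "month"] (PySem.Str.lower r) = true
      · simp [pvStepA, h1, h2, PySem.Dict.modify, PySem.Dict.insert, PySem.Dict.getD,
          PySem.Dict.get?, PySem.Dict.contains, ih, pvClassify, pvClassifyGo, pvTable]
      · by_cases h3 : pvHit ["quarter", "season", "plan", "develop"] (PySem.Str.lower r) = true
        · simp [pvStepA, h1, h2, h3, PySem.Dict.modify, PySem.Dict.insert, PySem.Dict.getD,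
            PySem.Dict.get?, PySem.Dict.contains, ih, pvClassify, pvClassifyGo, pvTable]
        · simp [pvStepA, h1, h2, h3, PySem.Dict.modify, PySem.Dict.insert, PySem.Dict.getD,
            PySem.Dict.get?, PySem.Dict.contains, ih, pvClassify, pvClassifyGo, pvTable]

-- ===== VERDICT (by name: the statement is the Claim_ definition above) =====
theorem suggest_implementation_timeline_py_spec : Claim_equal_suggest_implementation_timeline_py := by
  intro recs _
  show _ = _
  have hinit : (PySem.Dict.ofList
      [("immediate", ([] : List String)), ("short_term", []), ("medium_term", []), ("long_term", [])])
      = PySem.Dict.mk [("immediate", []), ("short_term", []), ("medium_term", []), ("long_term", [])] := by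
    decide
  simp only [suggest_implementation_timeline_py, hinit, pvFold_items]
  simp [suggest_implementation_timeline_py_alt, pvTable]
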